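-- pv_equiv track=rewrite | github.com/zudljk/ganttoid | src/ganttoid/plan_project.py | calculate_early_start_end
-- ===== SOURCE A (Python) =====
-- def calculate_early_start_end(project_plan, task_durations):
--     early_start = {}
--     early_end = {}
--
--     # Initialize early start for the first task
--     early_start['A'] = 0
--
--     # Calculate early start and early end for all tasks
--     for task in topological_sort(project_plan):
--         early_start[task] = max(early_end[dependent] for dependent in project_plan[task]) if project_plan[task] else 0
--         early_end[task] = early_start[task] + task_durations[task]
--
--     return early_start, early_end
--
-- def topological_sort(graph, reverse=False):
--     visited = set()
--     order = []
--
--     def visit(node):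
--         if node not in visited:
--             visited.add(node)
--             for neighbor in graph[node]:
--                 visit(neighbor)
--             order.append(node)
--
--     for node in graph:
--         if node not in visited:
--             visit(node)
--
--     return reversed(order) if reverse else order
-- ===== SOURCE B (Python) =====
-- def calculate_early_start_end(project_plan, task_durations):
--     early_start = {}
--     early_end = {}
--
--     # Initialize early start for the first task
--     early_start['A'] = 0
--
--     def resolve(task):
--         # memoized recursion over the dependency graph; returns early_end[task]
--         if task in early_end:
--             return early_end[task]
--         deps = project_plan[task]
--         start = max(resolve(dep) for dep in deps) if deps else 0
--         early_start[task] = start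
--         early_end[task] = start + task_durations[task]
--         return early_end[task]
--
--     for task in project_plan:
--         resolve(task)
--
--     return early_start, early_end
-- ===== Notes on version B (the rewrite author's own statement) =====
-- stated objective: alternative
-- what changed: A runs an explicit DFS topological sort and then a separate DP loop over the sorted order; B fuses both into a single memoized recursion resolve(task) that computes early start/end on demand along the dependency graph.
import Mathlib
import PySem

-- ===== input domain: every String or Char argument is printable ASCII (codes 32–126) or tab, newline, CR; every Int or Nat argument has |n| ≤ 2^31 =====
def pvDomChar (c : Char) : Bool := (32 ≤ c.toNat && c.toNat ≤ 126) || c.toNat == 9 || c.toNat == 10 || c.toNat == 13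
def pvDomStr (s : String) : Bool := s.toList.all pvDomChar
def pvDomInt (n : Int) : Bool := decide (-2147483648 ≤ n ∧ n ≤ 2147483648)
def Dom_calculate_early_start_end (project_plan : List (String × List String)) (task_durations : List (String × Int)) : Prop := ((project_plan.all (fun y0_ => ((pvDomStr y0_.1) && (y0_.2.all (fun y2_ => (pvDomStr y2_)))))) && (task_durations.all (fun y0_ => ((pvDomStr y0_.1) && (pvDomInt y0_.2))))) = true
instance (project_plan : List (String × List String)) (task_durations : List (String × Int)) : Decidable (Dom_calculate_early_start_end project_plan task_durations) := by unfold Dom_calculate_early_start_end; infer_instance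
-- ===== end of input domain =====

-- B replaces A's explicit topological sort + separate DP pass by ONE memoized recursion that
-- computes early start/end on the fly (objective: alternative decomposition, same asymptotic cost).
-- Equivalence is about the RETURN value; neither version mutates its arguments.

-- ===== PORT A =====
-- 'visit' of topological_sort; the Nat fuel only makes the recursion total — inside
-- Pre_ (acyclic plan) it never runs out (each call needs fuel > position in a topological order).
def pvVisit (graph : PySem.Dict String (List String)) :
    Nat → String → (PySem.Set String × List String) → (PySem.Set String × List String)
  | 0, _, st => st
  | fuel+1, node, st =>
      if st.1.contains node then st
      else
        let st1 := (st.1.add node, st.2)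
        let st2 := (graph.getD node []).foldl (fun acc nb => pvVisit graph fuel nb acc) st1
        (st2.1, st2.2 ++ [node])

def pvTopologicalSort (graph : PySem.Dict String (List String)) : List String :=
  (graph.keys.foldl (fun st n => pvVisit graph (graph.size + 1) n st) (PySem.Set.empty, [])).2

-- the body of A's for-loop: early_start[task] = max(...) if deps else 0; early_end[task] = ... + duration
def pvStep (graph : PySem.Dict String (List String)) (durations : PySem.Dict String Int)
    (st : PySem.Dict String Int × PySem.Dict String Int) (task : String) :
    PySem.Dict String Int × PySem.Dict String Int :=
  let deps := graph.getD task []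
  let s : Int := match deps.map (fun d => st.2.getD d 0) with
    | [] => 0                       -- 'if project_plan[task] else 0'
    | v :: vs => vs.foldl max v     -- Python max over the nonempty generator
  (st.1.insert task s, st.2.insert task (s + durations.getD task 0))

def calculate_early_start_end (project_plan : List (String × List String)) (task_durations : List (String × Int)) : (List (String × Int)) × (List (String × Int)) :=
  let graph := PySem.Dict.mk project_plan
  let durations := PySem.Dict.mk task_durations
  let early_start : PySem.Dict String Int := (PySem.Dict.empty).insert "A" 0
  let early_end : PySem.Dict String Int := PySem.Dict.empty
  let res := (pvTopologicalSort graph).foldl (pvStep graph durations) (early_start, early_end)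
  (res.1.items, res.2.items)

-- ===== PORT B =====
-- memoized recursion: returns (updated (early_start, early_end), early_end[task]); fuel as above.
def pvResolve (graph : PySem.Dict String (List String)) (durations : PySem.Dict String Int) :
    Nat → String → (PySem.Dict String Int × PySem.Dict String Int) →
    ((PySem.Dict String Int × PySem.Dict String Int) × Int)
  | 0, _, st => (st, 0)
  | fuel+1, task, st =>
      match st.2.get? task with
      | some v => (st, v)                   -- 'if task in early_end: return early_end[task]'
      | none =>
        let deps := graph.getD task []
        let r :=
          match deps with
          | [] => (st, (0 : Int))
          | d :: ds =>
              ds.foldl (fun acc d' =>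
                  let r' := pvResolve graph durations fuel d' acc.1
                  (r'.1, max acc.2 r'.2))
                (pvResolve graph durations fuel d st)
        let e := r.2 + durations.getD task 0
        ((r.1.1.insert task r.2, r.1.2.insert task e), e)

def calculate_early_start_end_alt (project_plan : List (String × List String)) (task_durations : List (String × Int)) : (List (String × Int)) × (List (String × Int)) :=
  let graph := PySem.Dict.mk project_plan
  let durations := PySem.Dict.mk task_durations
  let init : PySem.Dict String Int × PySem.Dict String Int := ((PySem.Dict.empty).insert "A" 0, PySem.Dict.empty)
  let res := graph.keys.foldl (fun st t => (pvResolve graph durations (graph.size + 1) t st).1) init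
  (res.1.items, res.2.items)

-- ===== PRECONDITION & SPEC =====
-- Kahn-style elimination: repeatedly mark tasks all of whose dependencies are already marked;
-- succeeds iff the dependency graph is acyclic with all dependencies present as keys.
def pvReady (project_plan : List (String × List String)) (done : List String) : List (String × List String) :=
  project_plan.filter (fun p => !done.contains p.1 && p.2.all (fun d => done.contains d))

def pvElim (project_plan : List (String × List String)) : Nat → List String → Bool
  | 0, done => project_plan.all (fun p => done.contains p.1)
  | n+1, done =>
      let r := pvReady project_plan done
      if r.isEmpty then project_plan.all (fun p => done.contains p.1)
      else pvElim project_plan n (done ++ r.map Prod.fst)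

-- Pre_ excludes (a) association lists with duplicate keys, which a Python dict cannot represent,
-- and (b) inputs where A raises KeyError: a dependency or task missing from project_plan /
-- task_durations, or a dependency cycle (exactly the inputs pvElim cannot schedule).
def Pre_calculate_early_start_end (project_plan : List (String × List String)) (task_durations : List (String × Int)) : Prop :=
  (project_plan.map Prod.fst).Nodup ∧
  (task_durations.map Prod.fst).Nodup ∧
  (∀ p ∈ project_plan, p.1 ∈ task_durations.map Prod.fst) ∧
  pvElim project_plan project_plan.length [] = true
instance (project_plan : List (String × List String)) (task_durations : List (String × Int)) : Decidable (Pre_calculate_early_start_end project_plan task_durations) := by unfold Pre_calculate_early_start_end; infer_instance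

def pvWitness_calculate_early_start_end : (List (String × List String)) × (List (String × Int)) :=
  ([("B", ["A"]), ("A", [])], [("A", 3), ("B", 2)])

def Spec_calculate_early_start_end (project_plan : List (String × List String)) (task_durations : List (String × Int)) (out : (List (String × Int)) × (List (String × Int))) : Prop := out = calculate_early_start_end_alt project_plan task_durations
instance (project_plan : List (String × List String)) (task_durations : List (String × Int)) (out : (List (String × Int)) × (List (String × Int))) : Decidable (Spec_calculate_early_start_end project_plan task_durations out) := by unfold Spec_calculate_early_start_end; infer_instance

-- ===== CLAIM (what is proved, stated in full; the proofs are below) =====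
def Claim_equal_calculate_early_start_end : Prop := ∀ (project_plan : List (String × List String)) (task_durations : List (String × Int)), Dom_calculate_early_start_end project_plan task_durations → Pre_calculate_early_start_end project_plan task_durations → Spec_calculate_early_start_end project_plan task_durations (calculate_early_start_end project_plan task_durations)

-- ===== LEMMAS AND PROOFS =====

-- the common reference computation: the DP fold of A, started from {'A': 0}, {}
def pvDP (graph : PySem.Dict String (List String)) (durations : PySem.Dict String Int)
    (ord : List String) : PySem.Dict String Int × PySem.Dict String Int :=
  ord.foldl (pvStep graph durations) ((PySem.Dict.empty).insert "A" 0, PySem.Dict.empty)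

lemma pvDP_append (G : PySem.Dict String (List String)) (D : PySem.Dict String Int)
    (ord Δ : List String) :
    pvDP G D (ord ++ Δ) = Δ.foldl (pvStep G D) (pvDP G D ord) := by
  simp [pvDP, List.foldl_append]

-- keys of the early_end component of a pvStep fold
lemma mem_keys_foldl_step (G : PySem.Dict String (List String)) (D : PySem.Dict String Int)
    (l : List String) (st : PySem.Dict String Int × PySem.Dict String Int) (x : String) :
    x ∈ (l.foldl (pvStep G D) st).2.keys ↔ x ∈ st.2.keys ∨ x ∈ l := by
  induction l generalizing st with
  | nil => simp
  | cons a l ih =>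
      simp only [List.foldl_cons, ih, pvStep, PySem.Dict.mem_keys_insert, List.mem_cons]
      tauto

-- lookups of already-present keys are unchanged by later pvStep's at other keys
lemma getD_foldl_step_stable (G : PySem.Dict String (List String)) (D : PySem.Dict String Int)
    (l : List String) (st : PySem.Dict String Int × PySem.Dict String Int) (d : String)
    (h : ∀ x ∈ l, x ≠ d) :
    (l.foldl (pvStep G D) st).2.getD d 0 = st.2.getD d 0 := by
  induction l generalizing st with
  | nil => rfl
  | cons a l ih =>
      simp only [List.foldl_cons]
      rw [ih _ (fun x hx => h x (List.mem_cons_of_mem _ hx))]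
      have hda : d ≠ a := fun e => h a List.mem_cons_self e.symm
      simp [pvStep, PySem.Dict.getD_insert, hda]

-- ===== the simulation between A's DFS 'visit' and B's memoized 'resolve' =====

-- MainP: one visit call corresponds to one resolve call.
def MainP (G : PySem.Dict String (List String)) (D : PySem.Dict String Int) (L : List String)
    (fuel : Nat) : Prop :=
  ∀ (node : String) (vis : PySem.Set String) (ord stack : List String),
    L.idxOf node < fuel →
    (∀ s ∈ stack, L.idxOf node < L.idxOf s) →
    (∀ x, vis.contains x = true ↔ (x ∈ stack ∨ x ∈ ord)) →
    ∃ (vis' : PySem.Set String) (Δ : List String),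
      pvVisit G fuel node (vis, ord) = (vis', ord ++ Δ) ∧
      (∀ x ∈ Δ, x ∉ ord ∧ L.idxOf x ≤ L.idxOf node) ∧
      node ∈ ord ++ Δ ∧
      (∀ x, vis'.contains x = true ↔ (x ∈ stack ∨ x ∈ ord ++ Δ)) ∧
      pvResolve G D fuel node (pvDP G D ord) =
        (pvDP G D (ord ++ Δ), (pvDP G D (ord ++ Δ)).2.getD node 0)

-- FoldP: the loops over a list of nodes correspond (A: visit-fold, B: resolve-fold with running max).
def FoldP (G : PySem.Dict String (List String)) (D : PySem.Dict String Int) (L : List String)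
    (fuel : Nat) : Prop :=
  ∀ (ds : List String) (vis : PySem.Set String) (ord stack : List String) (acc : Int),
    (∀ d ∈ ds, L.idxOf d < fuel ∧ ∀ s ∈ stack, L.idxOf d < L.idxOf s) →
    (∀ x, vis.contains x = true ↔ (x ∈ stack ∨ x ∈ ord)) →
    ∃ (vis' : PySem.Set String) (Δ : List String),
      ds.foldl (fun acc nb => pvVisit G fuel nb acc) (vis, ord) = (vis', ord ++ Δ) ∧
      (∀ x ∈ Δ, x ∉ ord ∧ ∃ d ∈ ds, L.idxOf x ≤ L.idxOf d) ∧
      (∀ d ∈ ds, d ∈ ord ++ Δ) ∧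
      (∀ x, vis'.contains x = true ↔ (x ∈ stack ∨ x ∈ ord ++ Δ)) ∧
      ds.foldl (fun a d' => let r' := pvResolve G D fuel d' a.1; (r'.1, max a.2 r'.2))
          (pvDP G D ord, acc) =
        (pvDP G D (ord ++ Δ),
         (ds.map (fun d => (pvDP G D (ord ++ Δ)).2.getD d 0)).foldl max acc)

lemma resolve_memo (G : PySem.Dict String (List String)) (D : PySem.Dict String Int)
    (fuel : Nat) (node : String) (ord : List String) (hmem : node ∈ ord) :
    pvResolve G D (fuel+1) node (pvDP G D ord) =
      (pvDP G D ord, (pvDP G D ord).2.getD node 0) := by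
  have hk : node ∈ (pvDP G D ord).2.keys := by
    have := mem_keys_foldl_step G D ord ((PySem.Dict.empty).insert "A" 0, PySem.Dict.empty) node
    rw [pvDP]
    exact this.2 (Or.inr hmem)
  have hne : (pvDP G D ord).2.get? node ≠ none := by
    intro h
    exact (PySem.Dict.get?_eq_none_iff_not_mem_keys _ _).1 h hk
  obtain ⟨v, hv⟩ := Option.ne_none_iff_exists'.1 hne
  simp [pvResolve, hv, PySem.Dict.getD_eq_get?_getD]

lemma main_zero (G : PySem.Dict String (List String)) (D : PySem.Dict String Int)
    (L : List String) : MainP G D L 0 := by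
  intro node vis ord stack hfuel
  exact absurd hfuel (Nat.not_lt_zero _)

lemma fold_of_main (G : PySem.Dict String (List String)) (D : PySem.Dict String Int)
    (L : List String) (fuel : Nat) (hM : MainP G D L fuel) : FoldP G D L fuel := by
  intro ds
  induction ds with
  | nil =>
      intro vis ord stack acc _ hvis
      exact ⟨vis, [], by simp, by simp, by simp, by simpa using hvis, by simp⟩
  | cons d ds ih =>
      intro vis ord stack acc hds hvis
      obtain ⟨hfd, hsd⟩ := hds d List.mem_cons_self
      obtain ⟨vis1, Δ1, hA1, hΔ1, hdmem, hvis1, hB1⟩ := hM d vis ord stack hfd hsd hvis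
      obtain ⟨vis2, Δ2, hA2, hΔ2, hmem2, hvis2, hB2⟩ :=
        ih vis1 (ord ++ Δ1) stack (max acc ((pvDP G D (ord ++ Δ1)).2.getD d 0))
          (fun d' hd' => hds d' (List.mem_cons_of_mem _ hd')) hvis1
      refine ⟨vis2, Δ1 ++ Δ2, ?_, ?_, ?_, ?_, ?_⟩
      · simp only [List.foldl_cons, hA1, hA2, List.append_assoc]
      · intro x hx
        rcases List.mem_append.1 hx with h | h
        · exact ⟨(hΔ1 x h).1, d, List.mem_cons_self, (hΔ1 x h).2⟩
        · obtain ⟨hno, d', hd', hle⟩ := hΔ2 x h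
          exact ⟨fun hxo => hno (List.mem_append.2 (Or.inl hxo)),
            d', List.mem_cons_of_mem _ hd', hle⟩
      · intro d' hd'
        rcases List.mem_cons.1 hd' with h | h
        · subst h
          rcases List.mem_append.1 hdmem with h2 | h2
          · exact List.mem_append.2 (Or.inl h2)
          · exact List.mem_append.2 (Or.inr (List.mem_append.2 (Or.inl h2)))
        · have := hmem2 d' h
          rwa [List.append_assoc] at this
      · intro x
        rw [hvis2 x, List.append_assoc]
      · have hstable : (pvDP G D (ord ++ Δ1 ++ Δ2)).2.getD d 0
            = (pvDP G D (ord ++ Δ1)).2.getD d 0 := by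
          rw [pvDP_append G D (ord ++ Δ1) Δ2]
          exact getD_foldl_step_stable G D Δ2 _ d
            (fun x hx hxe => (hΔ2 x hx).1 (hxe ▸ hdmem))
        simp only [List.foldl_cons, hB1, hB2, List.map_cons, List.append_assoc] at *
        rw [hstable]

lemma main_succ (G : PySem.Dict String (List String)) (D : PySem.Dict String Int)
    (L : List String)
    (hrank : ∀ t d, d ∈ G.getD t [] → L.idxOf d < L.idxOf t) (fuel : Nat)
    (hM : MainP G D L fuel) (hF : FoldP G D L fuel) : MainP G D L (fuel+1) := by
  intro node vis ord stack hfuel hstack hvis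
  have hnstack : node ∉ stack := fun h => lt_irrefl _ (hstack node h)
  by_cases hmem : node ∈ ord
  · -- already visited / memoized
    have hc : node ∈ vis := (PySem.Set.contains_iff _ _).1 ((hvis node).2 (Or.inr hmem))
    refine ⟨vis, [], by simp [pvVisit, hc], by simp, by simpa using hmem,
      by simpa using hvis, ?_⟩
    rw [resolve_memo G D fuel node ord hmem]
    simp
  · have hc : node ∉ vis := by
      intro h
      rcases (hvis node).1 ((PySem.Set.contains_iff _ _).2 h) with h2 | h2
      · exact hnstack h2
      · exact hmem h2
    have hget : (pvDP G D ord).2.get? node = none := by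
      rw [PySem.Dict.get?_eq_none_iff_not_mem_keys]
      intro hk
      have := (mem_keys_foldl_step G D ord ((PySem.Dict.empty).insert "A" 0, PySem.Dict.empty) node).1 hk
      rcases this with h | h
      · rw [PySem.Dict.keys_empty] at h
        exact List.not_mem_nil h
      · exact hmem h
    have hvis' : ∀ x, (vis.add node).contains x = true ↔ (x ∈ node :: stack ∨ x ∈ ord) := by
      intro x
      rw [PySem.Set.contains_iff, PySem.Set.mem_add, List.mem_cons]
      
      rw [← PySem.Set.contains_iff, hvis x]
      tauto
    have hdeps : ∀ d ∈ G.getD node [], L.idxOf d < fuel ∧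
        ∀ s ∈ node :: stack, L.idxOf d < L.idxOf s := by
      intro d hd
      have h1 := hrank node d hd
      refine ⟨lt_of_lt_of_le h1 (Nat.lt_succ_iff.1 hfuel), ?_⟩
      intro s hs
      rcases List.mem_cons.1 hs with h | h
      · exact h ▸ h1
      · exact lt_trans h1 (hstack s h)
    match hdm : G.getD node [] with
    | [] =>
        refine ⟨vis.add node, [node], ?_, ?_, ?_, ?_, ?_⟩
        · simp [pvVisit, hc, hdm]
        · intro x hx
          rcases List.mem_singleton.1 hx with rfl
          exact ⟨hmem, le_refl _⟩
        · simp
        · intro x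
          rw [hvis' x, List.mem_append, List.mem_singleton, List.mem_cons]
          tauto
        · have hDP : pvDP G D (ord ++ [node]) = pvStep G D (pvDP G D ord) node := by
            rw [pvDP_append]; rfl
          simp only [pvResolve, hget, hdm, hDP, pvStep, List.map_nil]
          rw [PySem.Dict.getD_insert_self]
    | d :: ds =>
        obtain ⟨hfd, hsd⟩ := hdeps d (hdm ▸ List.mem_cons_self)
        obtain ⟨vis1, Δ1, hA1, hΔ1, hdmem, hvis1, hB1⟩ :=
          hM d (vis.add node) ord (node :: stack) hfd hsd hvis'
        obtain ⟨vis2, Δ2, hA2, hΔ2, hmem2, hvis2, hB2⟩ :=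
          hF ds vis1 (ord ++ Δ1) (node :: stack) ((pvDP G D (ord ++ Δ1)).2.getD d 0)
            (fun d' hd' => hdeps d' (hdm ▸ List.mem_cons_of_mem _ hd')) hvis1
        have hxlt : ∀ x ∈ Δ1 ++ Δ2, x ∉ ord ∧ L.idxOf x < L.idxOf node := by
          intro x hx
          rcases List.mem_append.1 hx with h | h
          · exact ⟨(hΔ1 x h).1, lt_of_le_of_lt (hΔ1 x h).2 (hrank node d (hdm ▸ List.mem_cons_self))⟩
          · obtain ⟨hno, d', hd', hle⟩ := hΔ2 x h
            exact ⟨fun hxo => hno (List.mem_append.2 (Or.inl hxo)),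
              lt_of_le_of_lt hle (hrank node d' (hdm ▸ List.mem_cons_of_mem _ hd'))⟩
        have hnodeΔ : node ∉ Δ1 ++ Δ2 := fun h => lt_irrefl _ (hxlt node h).2
        have hstable : (pvDP G D (ord ++ Δ1 ++ Δ2)).2.getD d 0
            = (pvDP G D (ord ++ Δ1)).2.getD d 0 := by
          rw [pvDP_append G D (ord ++ Δ1) Δ2]
          exact getD_foldl_step_stable G D Δ2 _ d
            (fun x hx hxe => (hΔ2 x hx).1 (hxe ▸ hdmem))
        have hDPmid : pvDP G D (ord ++ Δ1 ++ Δ2 ++ [node])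
            = pvStep G D (pvDP G D (ord ++ Δ1 ++ Δ2)) node := by
          rw [pvDP_append G D (ord ++ Δ1 ++ Δ2) [node]]; rfl
        have hstep : pvStep G D (pvDP G D (ord ++ Δ1 ++ Δ2)) node =
            ((pvDP G D (ord ++ Δ1 ++ Δ2)).1.insert node
              ((ds.map (fun d' => (pvDP G D (ord ++ Δ1 ++ Δ2)).2.getD d' 0)).foldl max
                ((pvDP G D (ord ++ Δ1)).2.getD d 0)),
             (pvDP G D (ord ++ Δ1 ++ Δ2)).2.insert node
              ((ds.map (fun d' => (pvDP G D (ord ++ Δ1 ++ Δ2)).2.getD d' 0)).foldl max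
                ((pvDP G D (ord ++ Δ1)).2.getD d 0) + D.getD node 0)) := by
          rw [pvStep]
          simp only [hdm, List.map_cons, hstable]
        refine ⟨vis2, Δ1 ++ Δ2 ++ [node], ?_, ?_, ?_, ?_, ?_⟩
        · simp only [pvVisit, hdm]
          rw [if_neg (by simpa using hc)]
          simp only [List.foldl_cons, hA1, hA2, List.append_assoc]
        · intro x hx
          rcases List.mem_append.1 hx with h | h
          · exact ⟨(hxlt x h).1, le_of_lt (hxlt x h).2⟩
          · rcases List.mem_singleton.1 h with rfl
            exact ⟨hmem, le_refl _⟩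
        · simp
        · intro x
          rw [hvis2 x]
          simp only [List.mem_append, List.mem_cons]
          tauto
        · simp only [pvResolve, hget, hdm]
          rw [hB1, hB2]
          have hassoc : ord ++ (Δ1 ++ Δ2 ++ [node]) = (ord ++ Δ1 ++ Δ2) ++ [node] := by
            simp [List.append_assoc]
          rw [hassoc, hDPmid, hstep]
          rw [PySem.Dict.getD_insert_self]

lemma main_all (G : PySem.Dict String (List String)) (D : PySem.Dict String Int)
    (L : List String)
    (hrank : ∀ t d, d ∈ G.getD t [] → L.idxOf d < L.idxOf t) :
    ∀ fuel, MainP G D L fuel := by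
  intro fuel
  induction fuel with
  | zero => exact main_zero G D L
  | succ n ih => exact main_succ G D L hrank n ih (fold_of_main G D L n ih)

-- the top-level loops over graph.keys correspond
lemma top_sim (G : PySem.Dict String (List String)) (D : PySem.Dict String Int) (L : List String)
    (hrank : ∀ t d, d ∈ G.getD t [] → L.idxOf d < L.idxOf t) (F : Nat) :
    ∀ (ks : List String) (vis : PySem.Set String) (ord : List String),
      (∀ n ∈ ks, L.idxOf n < F) →
      (∀ x, vis.contains x = true ↔ x ∈ ord) →
      ∃ (vis' : PySem.Set String) (Δ : List String),
        ks.foldl (fun st n => pvVisit G F n st) (vis, ord) = (vis', ord ++ Δ) ∧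
        ks.foldl (fun st t => (pvResolve G D F t st).1) (pvDP G D ord) = pvDP G D (ord ++ Δ) := by
  intro ks
  induction ks with
  | nil =>
      intro vis ord _ _
      exact ⟨vis, [], by simp, by simp⟩
  | cons n ks ih =>
      intro vis ord hk hvis
      obtain ⟨vis1, Δ1, hA1, _, _, hvis1, hB1⟩ :=
        main_all G D L hrank F n vis ord [] (hk n List.mem_cons_self) (by simp)
          (by intro x; rw [hvis x]; simp)
      obtain ⟨vis2, Δ2, hA2, hB2⟩ :=
        ih vis1 (ord ++ Δ1) (fun m hm => hk m (List.mem_cons_of_mem _ hm))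
          (by intro x; rw [hvis1 x]; simp)
      refine ⟨vis2, Δ1 ++ Δ2, ?_, ?_⟩
      · simp only [List.foldl_cons, hA1, hA2, List.append_assoc]
      · simp only [List.foldl_cons, hB1, hB2, List.append_assoc]

lemma getD_mk_of_not_key (plan : List (String × List String)) (t : String)
    (h : t ∉ plan.map Prod.fst) : (PySem.Dict.mk plan).getD t [] = [] := by
  rw [PySem.Dict.getD_eq_get?_getD]
  have hn : (PySem.Dict.mk plan).get? t = none := by
    simp only [PySem.Dict.get?]
    rw [List.find?_eq_none.2]
    · rfl
    · intro p hp
      simp only [beq_iff_eq]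
      exact fun e => h (List.mem_map.2 ⟨p, hp, e⟩)
  simp [hn]

lemma getD_mk_of_mem (plan : List (String × List String)) (p : String × List String)
    (hnd : (plan.map Prod.fst).Nodup) (hp : p ∈ plan) :
    (PySem.Dict.mk plan).getD p.1 [] = p.2 := by
  obtain ⟨k, v⟩ := p
  have hs : (PySem.Dict.mk plan).get? k = some v :=
    PySem.Dict.get?_of_mem_items _ hp (by simpa [PySem.Dict.keys] using hnd)
  simp [PySem.Dict.getD_eq_get?_getD, hs]

lemma elim_finish (plan : List (String × List String)) (done : List String)
    (hnd2 : done.Nodup) (hin : ∀ t ∈ done, t ∈ plan.map Prod.fst)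
    (hgood : ∀ t ∈ done, ∀ d ∈ (PySem.Dict.mk plan).getD t [], done.idxOf d < done.idxOf t)
    (hall : plan.all (fun p => done.contains p.1) = true) :
    ∃ L : List String, L.Nodup ∧ (∀ t ∈ L, t ∈ plan.map Prod.fst) ∧
      (∀ t ∈ plan.map Prod.fst, t ∈ L) ∧
      (∀ t d, d ∈ (PySem.Dict.mk plan).getD t [] → L.idxOf d < L.idxOf t) := by
  have hkeys : ∀ t ∈ plan.map Prod.fst, t ∈ done := by
    intro t ht
    obtain ⟨p, hp, e⟩ := List.mem_map.1 ht
    have := List.all_eq_true.1 hall p hp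
    rw [← e]
    exact List.contains_iff_mem.1 (by simpa using this)
  refine ⟨done, hnd2, hin, hkeys, ?_⟩
  intro t d hd
  by_cases htd : t ∈ done
  · exact hgood t htd d hd
  · exfalso
    have hk : t ∉ plan.map Prod.fst := fun hk => htd (hkeys t hk)
    rw [getD_mk_of_not_key plan t hk] at hd
    exact List.not_mem_nil hd

lemma elim_sound (plan : List (String × List String)) (hnd : (plan.map Prod.fst).Nodup) :
    ∀ (fuel : Nat) (done : List String), done.Nodup →
      (∀ t ∈ done, t ∈ plan.map Prod.fst) →
      (∀ t ∈ done, ∀ d ∈ (PySem.Dict.mk plan).getD t [], done.idxOf d < done.idxOf t) →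
      pvElim plan fuel done = true →
      ∃ L : List String, L.Nodup ∧ (∀ t ∈ L, t ∈ plan.map Prod.fst) ∧
        (∀ t ∈ plan.map Prod.fst, t ∈ L) ∧
        (∀ t d, d ∈ (PySem.Dict.mk plan).getD t [] → L.idxOf d < L.idxOf t) := by
  intro fuel
  induction fuel with
  | zero =>
      intro done hnd2 hin hgood hE
      exact elim_finish plan done hnd2 hin hgood (by simpa [pvElim] using hE)
  | succ n ih =>
      intro done hnd2 hin hgood hE
      simp only [pvElim] at hE
      by_cases hr : (pvReady plan done).isEmpty
      · rw [if_pos hr] at hE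
        exact elim_finish plan done hnd2 hin hgood hE
      · rw [if_neg hr] at hE
        -- facts about the newly ready tasks
        have hready : ∀ p ∈ pvReady plan done,
            p ∈ plan ∧ p.1 ∉ done ∧ ∀ d ∈ p.2, d ∈ done := by
          intro p hp
          obtain ⟨hp1, hp2⟩ := List.mem_filter.1 hp
          simp only [Bool.and_eq_true, Bool.not_eq_true'] at hp2
          refine ⟨hp1, ?_, ?_⟩
          · intro hmem
            rw [List.contains_iff_mem.2 hmem] at hp2
            exact Bool.noConfusion hp2.1
          · intro d hd
            exact List.contains_iff_mem.1 (List.all_eq_true.1 hp2.2 d hd)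
        set new := (pvReady plan done).map Prod.fst with hnew
        have hnewnd : new.Nodup := by
          apply List.Nodup.sublist _ hnd
          exact List.Sublist.map Prod.fst List.filter_sublist
        have hnewdone : ∀ t ∈ new, t ∉ done := by
          intro t ht
          obtain ⟨p, hp, e⟩ := List.mem_map.1 ht
          rw [← e]; exact (hready p hp).2.1
        have hnd2' : (done ++ new).Nodup := by
          refine List.Nodup.append hnd2 hnewnd ?_
          intro a ha hb
          exact hnewdone a hb ha
        have hin' : ∀ t ∈ done ++ new, t ∈ plan.map Prod.fst := by
          intro t ht
          rcases List.mem_append.1 ht with h | h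
          · exact hin t h
          · obtain ⟨p, hp, e⟩ := List.mem_map.1 h
            exact List.mem_map.2 ⟨p, (hready p hp).1, e⟩
        have hgood' : ∀ t ∈ done ++ new, ∀ d ∈ (PySem.Dict.mk plan).getD t [],
            (done ++ new).idxOf d < (done ++ new).idxOf t := by
          intro t ht d hd
          rcases List.mem_append.1 ht with h | h
          · have h1 := hgood t h d hd
            have hdlt : d ∈ done := List.idxOf_lt_length_iff.1
              (lt_trans h1 (List.idxOf_lt_length_iff.2 h))
            rw [List.idxOf_append_of_mem hdlt, List.idxOf_append_of_mem h]
            exact h1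
          · obtain ⟨p, hp, e⟩ := List.mem_map.1 h
            obtain ⟨hp1, hp2, hp3⟩ := hready p hp
            have hdeps : (PySem.Dict.mk plan).getD t [] = p.2 := by
              rw [← e]; exact getD_mk_of_mem plan p hnd hp1
            have hddone : d ∈ done := hp3 d (hdeps ▸ hd)
            have ht2 : t ∉ done := e ▸ hp2
            rw [List.idxOf_append_of_mem hddone, List.idxOf_append_of_notMem ht2]
            calc done.idxOf d < done.length := List.idxOf_lt_length_iff.2 hddone
            _ ≤ done.length + new.idxOf t := Nat.le_add_right _ _
        exact ih (done ++ new) hnd2' hin' hgood' hE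

-- ===== VERDICT (by name: the statement is the Claim_ definition above) =====
theorem calculate_early_start_end_spec : Claim_equal_calculate_early_start_end := by
  intro plan durs _ hpre
  obtain ⟨hnd, hnd2, hdurk, helim⟩ := hpre
  obtain ⟨L, hLnd, hLkeys, hkeysL, hLrank⟩ :=
    elim_sound plan hnd plan.length [] List.nodup_nil (by simp) (by simp) helim
  have hLlen : L.length ≤ plan.length := by
    calc L.length = L.toFinset.card := (List.toFinset_card_of_nodup hLnd).symm
    _ ≤ (plan.map Prod.fst).toFinset.card := Finset.card_le_card (fun x hx => by
          simp only [List.mem_toFinset] at *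
          exact hLkeys x hx)
    _ ≤ (plan.map Prod.fst).length := (plan.map Prod.fst).toFinset_card_le
    _ = plan.length := by simp
  have hkF : ∀ n ∈ (PySem.Dict.mk plan).keys, L.idxOf n < (PySem.Dict.mk plan).size + 1 := by
    intro n hn
    have hnk : n ∈ plan.map Prod.fst := by simpa [PySem.Dict.keys] using hn
    have h1 : L.idxOf n < L.length := List.idxOf_lt_length_iff.2 (hkeysL n hnk)
    have hsz : (PySem.Dict.mk plan).size = plan.length := by
      simp [PySem.Dict.size]
    omega
  obtain ⟨vis', Δ, hA, hB⟩ :=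
    top_sim (PySem.Dict.mk plan) (PySem.Dict.mk durs) L hLrank ((PySem.Dict.mk plan).size + 1)
      (PySem.Dict.mk plan).keys PySem.Set.empty [] hkF (by intro x; simp [PySem.Set.empty])
  show calculate_early_start_end plan durs = calculate_early_start_end_alt plan durs
  simp only [calculate_early_start_end, calculate_early_start_end_alt, pvTopologicalSort]
  rw [hA]
  have hinit : ((PySem.Dict.empty.insert "A" (0:Int)), (PySem.Dict.empty : PySem.Dict String Int))
      = pvDP (PySem.Dict.mk plan) (PySem.Dict.mk durs) [] := rfl
  rw [hinit, hB]
  simp [pvDP]
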